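-- pv_equiv track=rewrite | github.com/shankarsravanth02/python | 04_is_rotating_prime.py | is_rotating_prime
-- ===== SOURCE A (Python) =====
-- from itertools import permutations
--
-- def is_rotating_prime(num):
--     changes=permutations(str(num))
--     list1=[]
--     count=0
--     for i in list(changes):
--         strings="".join(i)
--         list1.append(int(strings))
--     for k in list1:
--         if (k>1):
--             for j in range(2,k):
--                 if (k%j==0):
--                     break
--             else:
--                 count=count+1
--     if (count==len(list1)):
--         return True
--     else: return False
-- ===== SOURCE B (Python) =====
-- from itertools import permutations
--
--
-- def _is_prime(k):
--     if k < 2: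
--         return False
--     d = 2
--     while d * d <= k:
--         if k % d == 0:
--             return False
--         d += 1
--     return True
--
--
-- def is_rotating_prime(num):
--     return all(_is_prime(int("".join(p))) for p in permutations(str(num)))
-- ===== Notes on version B (the rewrite author's own statement) =====
-- stated objective: faster
-- what changed: B replaces A's count-every-permutation pass with full trial division up to k by an all() short-circuit over a divisor test bounded by sqrt(k), stopping at the first non-prime permutation.
import Mathlib
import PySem

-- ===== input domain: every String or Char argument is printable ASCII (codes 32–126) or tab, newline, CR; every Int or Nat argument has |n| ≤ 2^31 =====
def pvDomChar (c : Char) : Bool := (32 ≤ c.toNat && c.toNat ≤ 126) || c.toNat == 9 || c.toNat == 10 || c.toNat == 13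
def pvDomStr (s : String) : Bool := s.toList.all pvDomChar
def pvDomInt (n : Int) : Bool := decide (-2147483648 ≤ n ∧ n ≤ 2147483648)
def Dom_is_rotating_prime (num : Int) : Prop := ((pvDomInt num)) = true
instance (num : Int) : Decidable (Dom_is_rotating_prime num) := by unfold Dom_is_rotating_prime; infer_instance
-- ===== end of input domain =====

-- B replaces A's count-then-compare pass with full trial division up to k by an all() short-circuit
-- over a divisor loop bounded by d*d ≤ k (same return value on every num ≥ 0).

-- ===== PORT A =====
-- helper shared by both ports: itertools.permutations(str(num)), tuples in itertools' index order
def pvSelections {α : Type} : List α → List (α × List α)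
  | [] => []
  | x :: xs => (x, xs) :: (pvSelections xs).map (fun p => (p.1, x :: p.2))

def pvPermsFuel {α : Type} : Nat → List α → List (List α)
  | _, [] => [[]]
  | 0, _ :: _ => [[]]
  | n+1, x :: xs =>
      (pvSelections (x :: xs)).flatMap (fun p => (pvPermsFuel n p.2).map (fun r => p.1 :: r))

def pvPerms {α : Type} (l : List α) : List (List α) := pvPermsFuel l.length l

-- A's inner 'for j in range(2,k): if k%j==0: break / else:' — true iff the loop completes
def pvTrialDiv (k : Int) : List Int → Bool
  | [] => true
  | j :: js => if PySem.Int.mod k j == 0 then false else pvTrialDiv k js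

-- int("".join(i)) raises ValueError only for negative num (a '-' permuted inside); Pre_
-- excludes those, so the Option default below is unreachable on the claimed domain
def is_rotating_prime (num : Int) : Bool :=
  let changes := pvPerms (PySem.Int.toStr num).toList
  let list1 := changes.map (fun i => (PySem.Int.ofStr? (String.mk i)).getD 0)
  let count := list1.foldl (fun count k =>
      if k > 1 then
        (if pvTrialDiv k (PySem.List.pyRange 2 k 1) then count + 1 else count)
      else count) (0 : Int)
  count == (list1.length : Int)

-- ===== PORT B =====
-- B's 'while d * d <= k:' loop of _is_prime
def pvSqrtLoop (k d : Int) : Bool :=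
  if _h : d * d ≤ k then
    (if PySem.Int.mod k d == 0 then false else pvSqrtLoop k (d + 1))
  else true
termination_by (k + 1 - d).toNat
decreasing_by
  have hd : d ≤ k := by nlinarith [sq_nonneg (d - 1), sq_nonneg d]
  omega

def pvIsPrimeB (k : Int) : Bool := if k < 2 then false else pvSqrtLoop k 2

def is_rotating_prime_alt (num : Int) : Bool :=
  (pvPerms (PySem.Int.toStr num).toList).all
    (fun p => pvIsPrimeB ((PySem.Int.ofStr? (String.mk p)).getD 0))

-- ===== PRECONDITION & SPEC =====
-- Pre_ excludes negative num, where A raises ValueError (int() of a permutation with '-' inside)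
def Pre_is_rotating_prime (num : Int) : Prop := 0 ≤ num
instance (num : Int) : Decidable (Pre_is_rotating_prime num) := by
  unfold Pre_is_rotating_prime; infer_instance
def pvWitness_is_rotating_prime : Int := 37

def Spec_is_rotating_prime (num : Int) (out : Bool) : Prop := out = is_rotating_prime_alt num
instance (num : Int) (out : Bool) : Decidable (Spec_is_rotating_prime num out) := by
  unfold Spec_is_rotating_prime; infer_instance

-- ===== CLAIM (what is proved, stated in full; the proofs are below) =====
def Claim_equal_is_rotating_prime : Prop := ∀ (num : Int), Dom_is_rotating_prime num → Pre_is_rotating_prime num → Spec_is_rotating_prime num (is_rotating_prime num)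

-- ===== LEMMAS AND PROOFS =====
-- A's per-element verdict: k is counted iff k > 1 and the inner loop finds no divisor
def pvAPrime (k : Int) : Bool := decide (k > 1) && pvTrialDiv k (PySem.List.pyRange 2 k 1)

theorem pvFoldCount (l : List Int) (c : Int) :
    l.foldl (fun count k =>
      if k > 1 then
        (if pvTrialDiv k (PySem.List.pyRange 2 k 1) then count + 1 else count)
      else count) c = c + (l.countP pvAPrime : Int) := by
  induction l generalizing c with
  | nil => simp
  | cons k l ih =>
      simp only [List.foldl_cons, List.countP_cons, ih, pvAPrime]
      by_cases h1 : k > 1 <;> by_cases h2 : pvTrialDiv k (PySem.List.pyRange 2 k 1) <;>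
        simp [h1, h2] <;> push_cast <;> ring

theorem pvTrialDiv_eq_true (k : Int) (l : List Int) :
    pvTrialDiv k l = true ↔ ∀ j ∈ l, ¬ (PySem.Int.mod k j = 0) := by
  induction l with
  | nil => simp [pvTrialDiv]
  | cons j js ih =>
      by_cases h : PySem.Int.mod k j = 0 <;> simp [pvTrialDiv, h, ih]

theorem pvSqrtLoop_eq_true (k d : Int) : 0 ≤ d →
    (pvSqrtLoop k d = true ↔ ∀ e : Int, d ≤ e → e * e ≤ k → ¬ (PySem.Int.mod k e = 0)) := by
  induction d using pvSqrtLoop.induct (k := k) with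
  | case1 d hle hmod =>
      intro _
      rw [pvSqrtLoop]
      simp only [dif_pos hle, if_pos hmod]
      constructor
      · intro hfalse; cases hfalse
      · intro hall
        exact absurd (beq_iff_eq.mp hmod) (hall d le_rfl hle)
  | case2 d hle hmod ih =>
      intro hd
      rw [pvSqrtLoop]
      simp only [dif_pos hle, if_neg hmod, ih (by omega : (0:Int) ≤ d + 1)]
      constructor
      · intro hall e hde hek
        rcases eq_or_lt_of_le hde with rfl | hlt
        · exact fun hc => hmod (beq_iff_eq.mpr hc)
        · exact hall e (by omega) hek
      · intro hall e hde hek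
        exact hall e (by omega) hek
  | case3 d hnot =>
      intro hd
      rw [pvSqrtLoop]
      simp only [dif_neg hnot, true_iff]
      intro e hde hek hc
      exact hnot (by nlinarith)

-- the heart: full trial division up to k agrees with the √k-bounded loop
theorem pvAPrime_eq (k : Int) : pvAPrime k = pvIsPrimeB k := by
  by_cases hk : k < 2
  · have h1 : ¬ (k > 1) := by omega
    simp [pvAPrime, pvIsPrimeB, hk, h1]
  · have h1 : k > 1 := by omega
    simp only [pvAPrime, pvIsPrimeB, hk, if_neg, not_false_iff, h1,
      decide_true, Bool.true_and]
    rw [Bool.eq_iff_iff, pvTrialDiv_eq_true, pvSqrtLoop_eq_true k 2 (by norm_num)]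
    constructor
    · intro hall e h2e hek
      have he : e ∈ PySem.List.pyRange 2 k 1 := by
        rw [PySem.List.mem_pyRange_one]
        constructor
        · exact h2e
        · nlinarith
      exact hall e he
    · intro hall j hj
      rw [PySem.List.mem_pyRange_one] at hj
      obtain ⟨h2j, hjk⟩ := hj
      rw [PySem.Int.mod_eq_zero_iff_dvd]
      intro hdvd
      obtain ⟨m, hm⟩ := hdvd
      have hm2 : 2 ≤ m := by nlinarith
      by_cases hle : j ≤ m
      · exact hall j h2j (by nlinarith) (by rw [PySem.Int.mod_eq_zero_iff_dvd]; exact ⟨m, hm⟩)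
      · exact hall m hm2 (by nlinarith)
          (by rw [PySem.Int.mod_eq_zero_iff_dvd]; exact ⟨j, by rw [hm]; ring⟩)

theorem pvCount_eq_all (l : List Int) :
    ((l.countP pvAPrime : Int) == (l.length : Int)) = l.all pvIsPrimeB := by
  rw [Bool.eq_iff_iff, beq_iff_eq, List.all_eq_true]
  have hle := List.countP_le_length (p := pvAPrime) (l := l)
  constructor
  · intro h a ha
    rw [← pvAPrime_eq]
    have : l.countP pvAPrime = l.length := by exact_mod_cast h
    exact List.countP_eq_length.mp this a ha
  · intro h
    have : l.countP pvAPrime = l.length :=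
      List.countP_eq_length.mpr (fun a ha => by rw [pvAPrime_eq]; exact h a ha)
    exact_mod_cast this

-- ===== VERDICT (by name: the statement is the Claim_ definition above) =====
theorem is_rotating_prime_spec : Claim_equal_is_rotating_prime := by
  intro num _ _
  unfold Spec_is_rotating_prime is_rotating_prime is_rotating_prime_alt
  simp only [pvFoldCount, zero_add, pvCount_eq_all, List.all_map]
  rfl
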